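-- pv_equiv track=rewrite | github.com/david-wis/algebra-relaciones | relaciones.py | IsReflexive
-- ===== SOURCE A (Python) =====
-- def IsReflexive(A, R):
--     reflexDic = {}
--     for x in A:
--         reflexDic[x] = False
--
--     for (x,y) in R:
--         if x == y:
--             reflexDic[x] = True
--     return all(x for x in reflexDic.values())
-- ===== SOURCE B (Python) =====
-- def IsReflexive(A, R):
--     for x in A:
--         if (x, x) not in R:
--             return False
--     return True
-- ===== Notes on version B (the rewrite author's own statement) =====
-- stated objective: simpler
-- what changed: B drops A's auxiliary dict entirely: it scans R directly for each element of A, checking (x, x) in R with early exit on the first missing self-loop, instead of building A-keyed flags marked while iterating R and then testing all values.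
import Mathlib
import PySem

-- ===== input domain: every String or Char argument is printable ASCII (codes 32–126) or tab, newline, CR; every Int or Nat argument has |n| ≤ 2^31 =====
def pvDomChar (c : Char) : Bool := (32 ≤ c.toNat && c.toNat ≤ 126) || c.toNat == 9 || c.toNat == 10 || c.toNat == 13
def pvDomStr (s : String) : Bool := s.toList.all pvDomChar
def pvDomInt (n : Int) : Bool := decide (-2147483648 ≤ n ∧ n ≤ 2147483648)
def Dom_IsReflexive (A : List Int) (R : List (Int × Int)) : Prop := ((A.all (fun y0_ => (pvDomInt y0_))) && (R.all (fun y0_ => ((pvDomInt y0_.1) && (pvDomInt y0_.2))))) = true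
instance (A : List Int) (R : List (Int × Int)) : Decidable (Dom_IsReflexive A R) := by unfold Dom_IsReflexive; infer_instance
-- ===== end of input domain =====

-- B drops A's auxiliary flag dict: it checks (x, x) ∈ R directly for each x in A with early exit; simpler but O(|A|·|R|) vs A's O(|A|+|R|).


-- ===== PORT A =====
def IsReflexive (A : List Int) (R : List (Int × Int)) : Bool :=
  -- reflexDic = {}; for x in A: reflexDic[x] = False
  let reflexDic : PySem.Dict Int Bool :=
    A.foldl (fun d x => d.insert x false) PySem.Dict.empty
  -- for (x,y) in R: if x == y: reflexDic[x] = True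
  let reflexDic :=
    R.foldl (fun d p => if p.1 == p.2 then d.insert p.1 true else d) reflexDic
  -- return all(x for x in reflexDic.values())
  reflexDic.values.all (fun v => v)

-- ===== PORT B =====
-- for x in A: if (x, x) not in R: return False / return True
-- ((x, x) in R, list membership, ported as a linear scan of R)
def IsReflexive_alt (A : List Int) (R : List (Int × Int)) : Bool :=
  match A with
  | [] => true
  | x :: rest =>
    if ¬ (R.any (fun p => p == (x, x))) then false
    else IsReflexive_alt rest R

-- ===== PRECONDITION & SPEC =====
def Spec_IsReflexive (A : List Int) (R : List (Int × Int)) (out : Bool) : Prop := out = IsReflexive_alt A R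
instance (A : List Int) (R : List (Int × Int)) (out : Bool) : Decidable (Spec_IsReflexive A R out) := by unfold Spec_IsReflexive; infer_instance

-- ===== CLAIM (what is proved, stated in full; the proofs are below) =====
def Claim_equal_IsReflexive : Prop := ∀ (A : List Int) (R : List (Int × Int)), Dom_IsReflexive A R → Spec_IsReflexive A R (IsReflexive A R)

-- ===== LEMMAS AND PROOFS =====

-- keys of an insert, as a Set.add
theorem keys_insert_eq_add (d : PySem.Dict Int Bool) (k : Int) (v : Bool) :
    (d.insert k v).keys = PySem.Set.add d.keys k := by
  by_cases h : d.contains k = true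
  · rw [PySem.Dict.keys_insert_of_contains _ _ h, PySem.Set.add_of_mem]
    exact (PySem.Dict.contains_iff_mem_keys _ _).mp h
  · rw [PySem.Dict.keys_insert_of_not_contains _ _ (by simpa using h),
        PySem.Set.add_of_not_mem]
    intro hm
    exact h ((PySem.Dict.contains_iff_mem_keys _ _).mpr hm)

-- the second loop: lookup after folding R
theorem fold2_get? (R : List (Int × Int)) (d : PySem.Dict Int Bool) (k : Int) :
    (R.foldl (fun d p => if p.1 == p.2 then d.insert p.1 true else d) d).get? k
      = if (k, k) ∈ R then some true else d.get? k := by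
  induction R generalizing d with
  | nil => simp
  | cons p rest ih =>
    simp only [List.foldl_cons, ih]
    by_cases hrest : (k, k) ∈ rest
    · simp [hrest]
    · by_cases hp : (k, k) = p
      · subst hp
        simp [hrest, PySem.Dict.get?_insert_self]
      · have hmem : ¬ (k, k) ∈ p :: rest := by
          simp [hrest, hp]
        simp only [hmem, hrest, if_false]
        by_cases hd : (p.1 == p.2) = true
        · simp only [hd, if_true]
          apply PySem.Dict.get?_insert_of_ne
          intro hk
          apply hp
          have h12 : p.1 = p.2 := by simpa using hd
          obtain ⟨a, b⟩ := p
          simp_all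
        · simp [hd]

-- the second loop: keys after folding R
theorem fold2_keys (R : List (Int × Int)) (d : PySem.Dict Int Bool) :
    (R.foldl (fun d p => if p.1 == p.2 then d.insert p.1 true else d) d).keys
      = PySem.Set.update d.keys ((R.filter (fun p => p.1 == p.2)).map (·.1)) := by
  induction R generalizing d with
  | nil => simp
  | cons p rest ih =>
    by_cases hd : (p.1 == p.2) = true
    · rw [List.foldl_cons, if_pos hd, ih]
      simp only [List.filter_cons, hd, if_true, List.map_cons, PySem.Set.update_cons,
        keys_insert_eq_add]
    · rw [List.foldl_cons, if_neg hd, ih]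
      simp [hd]

-- the first loop: every stored value is false
theorem fold1_get? (A : List Int) (k : Int) :
    (A.foldl (fun d x => d.insert x false) (PySem.Dict.empty : PySem.Dict Int Bool)).get? k
      = if k ∈ A then some false else none := by
  have gen : ∀ (d : PySem.Dict Int Bool),
      (A.foldl (fun d x => d.insert x false) d).get? k
        = if k ∈ A then some false else d.get? k := by
    induction A with
    | nil => simp
    | cons a rest ih =>
      intro d
      simp only [List.foldl_cons, ih]
      by_cases hr : k ∈ rest
      · simp [hr]
      · by_cases ha : k = a
        · subst ha; simp [hr, PySem.Dict.get?_insert_self]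
        · simp [hr, ha, PySem.Dict.get?_insert_of_ne _ _ ha]
  simp [gen PySem.Dict.empty]

theorem fold1_keys (A : List Int) :
    (A.foldl (fun d x => d.insert x false) (PySem.Dict.empty : PySem.Dict Int Bool)).keys
      = PySem.Set.ofList A := by
  rw [PySem.Dict.keys_foldl_insert]
  simp [PySem.Set.update_nil_left]

theorem fold1_keys_nodup (A : List Int) :
    (A.foldl (fun d x => d.insert x false) (PySem.Dict.empty : PySem.Dict Int Bool)).keys.Nodup := by
  rw [fold1_keys]; exact PySem.Set.nodup_ofList A

-- characterisation of A's port
theorem IsReflexive_iff (A : List Int) (R : List (Int × Int)) :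
    IsReflexive A R = true ↔ ∀ x ∈ A, (x, x) ∈ R := by
  unfold IsReflexive
  simp only []
  set d1 := A.foldl (fun d x => d.insert x false) (PySem.Dict.empty : PySem.Dict Int Bool) with hd1
  set d2 := R.foldl (fun d p => if p.1 == p.2 then d.insert p.1 true else d) d1 with hd2
  have hkeys2 : d2.keys = PySem.Set.update d1.keys ((R.filter (fun p => p.1 == p.2)).map (·.1)) :=
    fold2_keys R d1
  have hnodup2 : d2.keys.Nodup := by
    rw [hkeys2]; exact PySem.Set.nodup_update _ _ (fold1_keys_nodup A)
  rw [PySem.Dict.values_eq_map_keys d2 hnodup2 false, List.all_eq_true]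
  simp only [List.forall_mem_map]
  have hmemdiag : ∀ k : Int, k ∈ (R.filter (fun p => p.1 == p.2)).map (·.1) ↔ (k, k) ∈ R := by
    intro k
    simp only [List.mem_map, List.mem_filter]
    constructor
    · rintro ⟨p, ⟨hpR, hpd⟩, hpk⟩
      have : p.1 = p.2 := by simpa using hpd
      have : p = (k, k) := by
        cases p; simp_all
      simpa [this] using hpR
    · intro h; exact ⟨(k, k), ⟨h, by simp⟩, rfl⟩
  have hval : ∀ k ∈ d2.keys, d2.getD k false = true ↔ (k, k) ∈ R := by
    intro k _
    rw [PySem.Dict.getD_eq_get?_getD, fold2_get?, hd1, fold1_get?]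
    by_cases hR : (k, k) ∈ R
    · simp [hR]
    · by_cases hA : k ∈ A <;> simp [hR, hA]
  have hmemk : ∀ k : Int, k ∈ d2.keys ↔ k ∈ A ∨ (k, k) ∈ R := by
    intro k
    rw [hkeys2, hd1, fold1_keys]
    rw [PySem.Set.mem_update]
    simp [PySem.Set.mem_ofList, hmemdiag k]
  constructor
  · intro h x hx
    have hk : x ∈ d2.keys := (hmemk x).mpr (Or.inl hx)
    exact (hval x hk).mp (by simpa using h _ hk)
  · intro h k hk
    rcases (hmemk k).mp hk with hA | hR
    · simpa using (hval k hk).mpr (h k hA)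
    · simpa using (hval k hk).mpr hR

-- characterisation of B's port
theorem IsReflexive_alt_iff (A : List Int) (R : List (Int × Int)) :
    IsReflexive_alt A R = true ↔ ∀ x ∈ A, (x, x) ∈ R := by
  induction A with
  | nil => simp [IsReflexive_alt]
  | cons x rest ih =>
    unfold IsReflexive_alt
    by_cases hmem : (x, x) ∈ R
    · have hany : R.any (fun p => p == (x, x)) = true := by
        simp only [List.any_eq_true]
        exact ⟨(x, x), hmem, by simp⟩
      simp [hany, ih, hmem]
    · have hany : R.any (fun p => p == (x, x)) = false := by
        simp only [List.any_eq_false]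
        intro p hp
        simp only [beq_iff_eq]
        intro hpe; exact hmem (hpe ▸ hp)
      simp [hany, hmem]

-- ===== VERDICT (by name: the statement is the Claim_ definition above) =====
theorem IsReflexive_spec : Claim_equal_IsReflexive := by
  intro A R _
  unfold Spec_IsReflexive
  rw [Bool.eq_iff_iff, IsReflexive_iff, IsReflexive_alt_iff]
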